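-- pv_equiv track=rewrite | github.com/daniel-reich/ubiquitous-fiesta | bf3QRDxH9Ns2SZWZw_0.py | all_explode
-- ===== SOURCE A (Python) =====
-- def all_explode(grid):
--   pos = {(i,j) for i in range(len(grid)) for j in range(len(grid[0]))}
--   bombs = {(i,j) for (i,j) in pos if grid[i][j] in 'x+'}
--
--   queue = [(0,0)]
--   exploded = set()
--   while queue:
--     (x,y) = queue.pop(0)
--     if grid[x][y] == "+":
--       dirs = [(1,0),(0,1),(-1,0),(0,-1)]
--     else:
--       dirs = [(1,1),(-1,1),(1,-1),(-1,-1)]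
--     for (i,j) in dirs:
--       if (x+i,y+j) in bombs and (x+i,y+j) not in exploded:
--         exploded = exploded.union({(x+i,y+j)})
--         queue+= [(x+i,y+j)]
--
--   return exploded == bombs
-- ===== SOURCE B (Python) =====
-- def all_explode(grid):
--   bombs = {(i, j) for i in range(len(grid)) for j in range(len(grid[0])) if grid[i][j] in 'x+'}
--
--   def succ(x, y):
--     if grid[x][y] == "+":
--       dirs = [(1, 0), (0, 1), (-1, 0), (0, -1)]
--     else:
--       dirs = [(1, 1), (-1, 1), (1, -1), (-1, -1)]
--     return {(x + dx, y + dy) for (dx, dy) in dirs if (x + dx, y + dy) in bombs}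
--
--   exploded = succ(0, 0)
--   while True:
--     new = {n for c in exploded for n in succ(*c)} - exploded
--     if not new:
--       break
--     exploded |= new
--   return exploded == bombs
-- ===== Notes on version B (the rewrite author's own statement) =====
-- stated objective: faster
-- what changed: Replaces A's FIFO worklist BFS (pop(0) from a queue, a fresh exploded.union copy per discovered bomb) with round-based fixpoint saturation: repeatedly add every bomb reachable in one step from the whole current exploded set until a round adds nothing new.
import Mathlib
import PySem

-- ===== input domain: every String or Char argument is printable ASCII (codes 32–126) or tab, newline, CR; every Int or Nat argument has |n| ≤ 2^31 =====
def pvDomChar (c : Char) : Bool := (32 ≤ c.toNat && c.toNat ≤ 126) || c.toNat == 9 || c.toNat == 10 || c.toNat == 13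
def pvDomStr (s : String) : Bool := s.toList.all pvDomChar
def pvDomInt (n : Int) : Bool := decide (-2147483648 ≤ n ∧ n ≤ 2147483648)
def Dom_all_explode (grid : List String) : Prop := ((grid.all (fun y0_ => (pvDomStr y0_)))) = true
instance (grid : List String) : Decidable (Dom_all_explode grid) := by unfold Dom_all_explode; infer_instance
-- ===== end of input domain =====

-- B replaces A's FIFO worklist (with its per-discovery full-set union copy and O(queue) pop(0))
-- by round-based saturation: repeatedly add every bomb reachable in one step from the current
-- exploded set until nothing new appears.  Equivalence of the RETURN value is proved on Pre_
-- (the inputs where the Python A returns instead of raising IndexError).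

-- grid[x][y] (both Pythons index cells only at (0,0) and at bomb coordinates, in range under
-- Pre_; the ' ' default is returned only where the Python would raise, outside Pre_)
def pvCell (grid : List String) (x y : Int) : Char :=
  ((PySem.List.pyGet? grid x).bind (fun row => PySem.Str.pyGet? row y)).getD ' '

-- the per-cell direction list: '+' bombs blast orthogonally, anything else diagonally
def pvDirs (grid : List String) (x y : Int) : List (Int × Int) :=
  if pvCell grid x y == '+' then [(1, 0), (0, 1), (-1, 0), (0, -1)]
  else [(1, 1), (-1, 1), (1, -1), (-1, -1)]

-- len(grid[0])  (Python raises on [], Pre_ excludes it)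
def pvCols (grid : List String) : Int :=
  PySem.Str.len ((PySem.List.pyGet? grid 0).getD "")

-- grid[i][j] in 'x+'
def pvIsBomb (grid : List String) (p : Int × Int) : Bool :=
  pvCell grid p.1 p.2 == 'x' || pvCell grid p.1 p.2 == '+'

-- number of bombs not yet exploded: termination measure of both loops
def pvRem (bombs ex : List (Int × Int)) : Nat :=
  bombs.countP (fun b => !(PySem.Set.contains ex b))

theorem pvCountP_lt {α : Type} (l : List α) (p q : α → Bool)
    (h : ∀ a ∈ l, p a = true → q a = true) (a0 : α) (ha : a0 ∈ l)
    (hq : q a0 = true) (hp : p a0 = false) : l.countP p < l.countP q := by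
  induction l with
  | nil => cases ha
  | cons x xs ih =>
    simp only [List.countP_cons]
    rcases List.mem_cons.mp ha with rfl | hmem
    · have hle : xs.countP p ≤ xs.countP q :=
        List.countP_mono_left (fun a ha' => h a (List.mem_cons_of_mem _ ha'))
      simp [hp, hq]
      omega
    · have hx : (if p x = true then 1 else 0) ≤ (if q x = true then 1 else 0) := by
        by_cases hpx : p x = true
        · simp [hpx, h x List.mem_cons_self hpx]
        · simp [hpx]
      have := ih (fun a ha' => h a (List.mem_cons_of_mem _ ha')) hmem
      omega

theorem pvRem_lt (bombs ex ex' : List (Int × Int)) (n : Int × Int)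
    (hnb : n ∈ bombs) (hnex : n ∉ ex) (hnex' : n ∈ ex')
    (hsub : ∀ b, b ∈ ex → b ∈ ex') : pvRem bombs ex' < pvRem bombs ex := by
  apply pvCountP_lt bombs _ _ _ n hnb
  · simp
    exact hnex
  · simp
    exact hnex'
  · intro a _ hpa
    simp at hpa ⊢
    exact fun hmem => hpa (hsub a hmem)

-- ===== PORT A =====

-- the body of A's inner 'for (i,j) in dirs' loop: state = (queue, exploded)
def pvStepA (bombs : PySem.Set (Int × Int)) (x y : Int)
    (st : List (Int × Int) × PySem.Set (Int × Int)) (d : Int × Int) :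
    List (Int × Int) × PySem.Set (Int × Int) :=
  if PySem.Set.contains bombs (x + d.1, y + d.2)
      && !(PySem.Set.contains st.2 (x + d.1, y + d.2)) then
    (st.1 ++ [(x + d.1, y + d.2)], PySem.Set.union st.2 [(x + d.1, y + d.2)])
  else st

theorem pvStepA_meas (bombs : PySem.Set (Int × Int)) (x y : Int)
    (st : List (Int × Int) × PySem.Set (Int × Int)) (d : Int × Int) :
    2 * pvRem bombs (pvStepA bombs x y st d).2 + (pvStepA bombs x y st d).1.length
      ≤ 2 * pvRem bombs st.2 + st.1.length := by
  unfold pvStepA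
  split
  · rename_i hguard
    simp only [Bool.and_eq_true, Bool.not_eq_true'] at hguard
    have hlt : pvRem bombs (PySem.Set.union st.2 [(x + d.1, y + d.2)]) < pvRem bombs st.2 := by
      apply pvRem_lt _ _ _ (x + d.1, y + d.2)
      · exact (PySem.Set.contains_iff _ _).mp hguard.1
      · intro hm
        have hc := (PySem.Set.contains_iff _ _).mpr hm
        rw [hguard.2] at hc
        cases hc
      · exact (PySem.Set.mem_union _ _ _).mpr (Or.inr (List.mem_singleton.mpr rfl))
      · intro b hb; exact (PySem.Set.mem_union _ _ _).mpr (Or.inl hb)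
    simp only [List.length_append, List.length_singleton]
    omega
  · exact le_refl _

theorem pvFoldA_meas (bombs : PySem.Set (Int × Int)) (x y : Int)
    (dirs : List (Int × Int)) :
    ∀ (q0 : List (Int × Int)) (ex0 : PySem.Set (Int × Int)),
    2 * pvRem bombs (dirs.foldl (pvStepA bombs x y) (q0, ex0)).2
        + (dirs.foldl (pvStepA bombs x y) (q0, ex0)).1.length
      ≤ 2 * pvRem bombs ex0 + q0.length := by
  induction dirs with
  | nil => intro q0 ex0; exact le_refl _
  | cons d ds ih =>
    intro q0 ex0
    rcases hst : pvStepA bombs x y (q0, ex0) d with ⟨q1, ex1⟩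
    have h1 := pvStepA_meas bombs x y (q0, ex0) d
    rw [hst] at h1
    simp only [List.foldl_cons, hst]
    exact le_trans (ih q1 ex1) h1

-- A's while-queue loop
def pvLoopA (grid : List String) (bombs : PySem.Set (Int × Int)) :
    List (Int × Int) → PySem.Set (Int × Int) → PySem.Set (Int × Int)
  | [], ex => ex
  | (x, y) :: rest, ex =>
    let st := (pvDirs grid x y).foldl (pvStepA bombs x y) (rest, ex)
    pvLoopA grid bombs st.1 st.2
termination_by q ex => 2 * pvRem bombs ex + q.length
decreasing_by
  have h := pvFoldA_meas bombs x y (pvDirs grid x y) rest ex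
  simp only [List.length_cons]
  omega

def all_explode (grid : List String) : Bool :=
  let pos : PySem.Set (Int × Int) :=
    PySem.Set.ofList ((PySem.List.pyRange 0 grid.length 1).flatMap
      (fun i => (PySem.List.pyRange 0 (pvCols grid) 1).map (fun j => (i, j))))
  let bombs : PySem.Set (Int × Int) := PySem.Set.ofList (pos.filter (pvIsBomb grid))
  let ex := pvLoopA grid bombs [((0 : Int), (0 : Int))] PySem.Set.empty
  PySem.Set.equal ex bombs

-- ===== PORT B =====

-- B's bombs comprehension (single pass with the condition inline)
def pvBombsB (grid : List String) : PySem.Set (Int × Int) :=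
  PySem.Set.ofList ((PySem.List.pyRange 0 grid.length 1).flatMap
    (fun i => ((PySem.List.pyRange 0 (pvCols grid) 1).filter
      (fun j => pvIsBomb grid (i, j))).map (fun j => (i, j))))

-- B's succ(x, y): the bombs hit directly from (x, y)
def pvSuccB (grid : List String) (bombs : PySem.Set (Int × Int)) (x y : Int) :
    PySem.Set (Int × Int) :=
  PySem.Set.ofList (((pvDirs grid x y).map (fun d => (x + d.1, y + d.2))).filter
    (fun n => PySem.Set.contains bombs n))

-- one saturation round: the bombs newly hit from the current exploded set
def pvRoundB (grid : List String) (bombs : PySem.Set (Int × Int))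
    (ex : PySem.Set (Int × Int)) : PySem.Set (Int × Int) :=
  PySem.Set.diff
    (PySem.Set.ofList (ex.flatMap (fun c => pvSuccB grid bombs c.1 c.2))) ex

-- B's saturation loop: grow 'exploded' by one whole round until no new bomb appears
def pvIterB (grid : List String) (bombs : PySem.Set (Int × Int))
    (ex : PySem.Set (Int × Int)) : PySem.Set (Int × Int) :=
  if (pvRoundB grid bombs ex).isEmpty then ex
  else pvIterB grid bombs (PySem.Set.union ex (pvRoundB grid bombs ex))
termination_by pvRem bombs ex
decreasing_by
  rename_i hne
  have hnil : pvRoundB grid bombs ex ≠ [] := by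
    intro h; rw [h] at hne; exact hne rfl
  obtain ⟨n, hn⟩ := List.exists_mem_of_ne_nil _ hnil
  have hd := (PySem.Set.mem_diff _ _ _).mp hn
  have hb : n ∈ bombs := by
    have h1 := (PySem.Set.mem_ofList _ _).mp hd.1
    obtain ⟨c, _, hc⟩ := List.mem_flatMap.mp h1
    have h2 := (PySem.Set.mem_ofList _ _).mp hc
    have h3 := (List.mem_filter.mp h2).2
    exact (PySem.Set.contains_iff _ _).mp h3
  exact pvRem_lt bombs ex _ n hb hd.2
    ((PySem.Set.mem_union _ _ _).mpr (Or.inr hn))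
    (fun b hb' => (PySem.Set.mem_union _ _ _).mpr (Or.inl hb'))

def all_explode_alt (grid : List String) : Bool :=
  let bombs := pvBombsB grid
  let ex := pvIterB grid bombs (pvSuccB grid bombs 0 0)
  PySem.Set.equal ex bombs

-- ===== PRECONDITION & SPEC =====
-- Pre_ = exactly the inputs on which the Python A returns: A raises IndexError when the grid is
-- empty, when its first row is empty, or when some row is shorter than the first row.
def Pre_all_explode (grid : List String) : Prop :=
  grid ≠ [] ∧ 0 < grid.headI.length ∧ ∀ row ∈ grid, grid.headI.length ≤ row.length
instance (grid : List String) : Decidable (Pre_all_explode grid) := by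
  unfold Pre_all_explode; infer_instance

def pvWitness_all_explode : List String := ["+x", "xx"]

def Spec_all_explode (grid : List String) (out : Bool) : Prop := out = all_explode_alt grid
instance (grid : List String) (out : Bool) : Decidable (Spec_all_explode grid out) := by
  unfold Spec_all_explode; infer_instance

-- ===== CLAIM (what is proved, stated in full; the proofs are below) =====
def Claim_equal_all_explode : Prop := ∀ (grid : List String), Dom_all_explode grid → Pre_all_explode grid → Spec_all_explode grid (all_explode grid)

-- ===== LEMMAS AND PROOFS =====

-- the bombs reachable by the chain reaction started at (0,0); both loops compute exactly this set
inductive pvReach (grid : List String) (bombs : List (Int × Int)) : Int × Int → Prop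
  | start (d : Int × Int) (hd : d ∈ pvDirs grid 0 0)
      (hb : ((0 : Int) + d.1, (0 : Int) + d.2) ∈ bombs) :
      pvReach grid bombs (0 + d.1, 0 + d.2)
  | step (c : Int × Int) (hc : pvReach grid bombs c) (d : Int × Int)
      (hd : d ∈ pvDirs grid c.1 c.2) (hb : (c.1 + d.1, c.2 + d.2) ∈ bombs) :
      pvReach grid bombs (c.1 + d.1, c.2 + d.2)

theorem pvReach_congr (grid : List String) (b1 b2 : List (Int × Int))
    (h : ∀ p, p ∈ b1 ↔ p ∈ b2) (c : Int × Int) :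
    pvReach grid b1 c → pvReach grid b2 c := by
  intro hr
  induction hr with
  | start d hd hb => exact pvReach.start d hd ((h _).mp hb)
  | step c hc d hd hb ih => exact pvReach.step c ih d hd ((h _).mp hb)

theorem pvStepA_facts (bombs : PySem.Set (Int × Int)) (x y : Int)
    (st : List (Int × Int) × PySem.Set (Int × Int)) (d : Int × Int) :
    (∀ c ∈ st.1, c ∈ (pvStepA bombs x y st d).1) ∧
    (∀ c ∈ st.2, c ∈ (pvStepA bombs x y st d).2) ∧
    (∀ c ∈ (pvStepA bombs x y st d).2, c ∈ st.2 ∨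
        (c ∈ (pvStepA bombs x y st d).1 ∧ c = (x + d.1, y + d.2) ∧ c ∈ bombs)) ∧
    ((x + d.1, y + d.2) ∈ bombs → (x + d.1, y + d.2) ∈ (pvStepA bombs x y st d).2) ∧
    (∀ c ∈ (pvStepA bombs x y st d).1, c ∈ st.1 ∨ c ∈ (pvStepA bombs x y st d).2) := by
  unfold pvStepA
  split
  · rename_i hguard
    simp only [Bool.and_eq_true, Bool.not_eq_true'] at hguard
    have hb : (x + d.1, y + d.2) ∈ bombs := (PySem.Set.contains_iff _ _).mp hguard.1
    refine ⟨?_, ?_, ?_, ?_, ?_⟩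
    · intro c hc; exact List.mem_append_left _ hc
    · intro c hc; exact (PySem.Set.mem_union _ _ _).mpr (Or.inl hc)
    · intro c hc
      rcases (PySem.Set.mem_union _ _ _).mp hc with h1 | h2
      · exact Or.inl h1
      · have : c = (x + d.1, y + d.2) := List.mem_singleton.mp h2
        exact Or.inr ⟨List.mem_append_right _ (this ▸ List.mem_singleton.mpr rfl), this, this ▸ hb⟩
    · intro _
      exact (PySem.Set.mem_union _ _ _).mpr (Or.inr (List.mem_singleton.mpr rfl))
    · intro c hc
      rcases List.mem_append.mp hc with h1 | h2
      · exact Or.inl h1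
      · exact Or.inr ((PySem.Set.mem_union _ _ _).mpr (Or.inr h2))
  · rename_i hguard
    refine ⟨fun c hc => hc, fun c hc => hc, fun c hc => Or.inl hc, ?_, fun c hc => Or.inl hc⟩
    intro hb
    simp only [Bool.and_eq_true, Bool.not_eq_true'] at hguard
    by_cases hmem : PySem.Set.contains st.2 (x + d.1, y + d.2) = true
    · exact (PySem.Set.contains_iff _ _).mp hmem
    · exact absurd ⟨(PySem.Set.contains_iff _ _).mpr hb, by simpa using hmem⟩ hguard

theorem pvFoldA_facts (bombs : PySem.Set (Int × Int)) (x y : Int)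
    (dirs : List (Int × Int)) :
    ∀ (st : List (Int × Int) × PySem.Set (Int × Int)),
    (∀ c ∈ st.1, c ∈ (dirs.foldl (pvStepA bombs x y) st).1) ∧
    (∀ c ∈ st.2, c ∈ (dirs.foldl (pvStepA bombs x y) st).2) ∧
    (∀ c ∈ (dirs.foldl (pvStepA bombs x y) st).2,
        c ∈ st.2 ∨ (c ∈ (dirs.foldl (pvStepA bombs x y) st).1 ∧
          ∃ d ∈ dirs, c = (x + d.1, y + d.2) ∧ c ∈ bombs)) ∧
    (∀ d ∈ dirs, (x + d.1, y + d.2) ∈ bombs →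
        (x + d.1, y + d.2) ∈ (dirs.foldl (pvStepA bombs x y) st).2) ∧
    (∀ c ∈ (dirs.foldl (pvStepA bombs x y) st).1, c ∈ st.1 ∨
        c ∈ (dirs.foldl (pvStepA bombs x y) st).2) := by
  induction dirs with
  | nil =>
    intro st
    exact ⟨fun c hc => hc, fun c hc => hc, fun c hc => Or.inl hc,
      fun d hd => absurd hd (List.not_mem_nil), fun c hc => Or.inl hc⟩
  | cons d ds ih =>
    intro st
    obtain ⟨s1, s2, s3, s4, s5⟩ := pvStepA_facts bombs x y st d
    obtain ⟨i1, i2, i3, i4, i5⟩ := ih (pvStepA bombs x y st d)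
    simp only [List.foldl_cons]
    refine ⟨fun c hc => i1 c (s1 c hc), fun c hc => i2 c (s2 c hc), ?_, ?_, ?_⟩
    · intro c hc
      rcases i3 c hc with h1 | ⟨hin, d', hd', hcd, hb⟩
      · rcases s3 c h1 with h2 | ⟨hin', hcd, hb⟩
        · exact Or.inl h2
        · exact Or.inr ⟨i1 c hin', d, List.mem_cons_self, hcd, hb⟩
      · exact Or.inr ⟨hin, d', List.mem_cons_of_mem _ hd', hcd, hb⟩
    · intro d' hd' hb
      rcases List.mem_cons.mp hd' with rfl | hmem
      · exact i2 _ (s4 hb)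
      · exact i4 d' hmem hb
    · intro c hc
      rcases i5 c hc with h1 | h2
      · rcases s5 c h1 with h2 | h3
        · exact Or.inl h2
        · exact Or.inr (i2 c h3)
      · exact Or.inr h2

theorem pvLoopA_sound (grid : List String) (bombs : PySem.Set (Int × Int)) :
    ∀ (q : List (Int × Int)) (ex : PySem.Set (Int × Int)),
      (∀ c ∈ q, c = ((0 : Int), (0 : Int)) ∨ pvReach grid bombs c) →
      (∀ c ∈ ex, pvReach grid bombs c) →
      ∀ c ∈ pvLoopA grid bombs q ex, pvReach grid bombs c := by
  intro q ex
  induction q, ex using pvLoopA.induct grid bombs with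
  | case1 ex =>
    intro _ hex c hc
    simp only [pvLoopA] at hc
    exact hex c hc
  | case2 x y rest ex st ih =>
    intro hq hex c hc
    simp only [pvLoopA] at hc
    obtain ⟨hmq, hmex, hmix, hsucc, hq'⟩ :=
      pvFoldA_facts bombs x y (pvDirs grid x y) (rest, ex)
    have hxy := hq (x, y) List.mem_cons_self
    have hex' : ∀ c' ∈ ((pvDirs grid x y).foldl (pvStepA bombs x y) (rest, ex)).2,
        pvReach grid bombs c' := by
      intro c' hc'
      rcases hmix c' hc' with h1 | ⟨_, d, hd, hcd, hb⟩
      · exact hex c' h1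
      · subst hcd
        rcases hxy with heq | hr
        · have hx : x = 0 := congrArg Prod.fst heq
          have hy : y = 0 := congrArg Prod.snd heq
          subst hx; subst hy
          exact pvReach.start d hd hb
        · exact pvReach.step (x, y) hr d hd hb
    have hq'' : ∀ c' ∈ ((pvDirs grid x y).foldl (pvStepA bombs x y) (rest, ex)).1,
        c' = ((0 : Int), (0 : Int)) ∨ pvReach grid bombs c' := by
      intro c' hc'
      rcases hq' c' hc' with h1 | h2
      · exact hq c' (List.mem_cons_of_mem _ h1)
      · exact Or.inr (hex' c' h2)
    exact ih hq'' hex' c hc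

theorem pvLoopA_closed (grid : List String) (bombs : PySem.Set (Int × Int)) :
    ∀ (q : List (Int × Int)) (ex : PySem.Set (Int × Int)),
      (∀ c : Int × Int, (c = ((0 : Int), (0 : Int)) ∨ c ∈ ex) → c ∈ q ∨
        ∀ d ∈ pvDirs grid c.1 c.2, (c.1 + d.1, c.2 + d.2) ∈ bombs →
          (c.1 + d.1, c.2 + d.2) ∈ ex) →
      ∀ c : Int × Int, (c = ((0 : Int), (0 : Int)) ∨ c ∈ pvLoopA grid bombs q ex) →
        ∀ d ∈ pvDirs grid c.1 c.2, (c.1 + d.1, c.2 + d.2) ∈ bombs →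
          (c.1 + d.1, c.2 + d.2) ∈ pvLoopA grid bombs q ex := by
  intro q ex
  induction q, ex using pvLoopA.induct grid bombs with
  | case1 ex =>
    intro hinv c hc d hd hb
    simp only [pvLoopA] at hc ⊢
    rcases hinv c hc with hin | hcl
    · exact absurd hin List.not_mem_nil
    · exact hcl d hd hb
  | case2 x y rest ex st ih =>
    intro hinv c hc d hd hb
    simp only [pvLoopA] at hc ⊢
    obtain ⟨hmq, hmex, hmix, hsucc, hq'⟩ :=
      pvFoldA_facts bombs x y (pvDirs grid x y) (rest, ex)
    refine ih ?_ c hc d hd hb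
    intro c' hc'
    have hold : (c' = ((0 : Int), (0 : Int)) ∨ c' ∈ ex) →
        c' ∈ ((pvDirs grid x y).foldl (pvStepA bombs x y) (rest, ex)).1 ∨
        ∀ d' ∈ pvDirs grid c'.1 c'.2, (c'.1 + d'.1, c'.2 + d'.2) ∈ bombs →
          (c'.1 + d'.1, c'.2 + d'.2) ∈
            ((pvDirs grid x y).foldl (pvStepA bombs x y) (rest, ex)).2 := by
      intro hdisc
      rcases hinv c' hdisc with hin | hcl
      · rcases List.mem_cons.mp hin with heq | hrest
        · subst heq
          exact Or.inr (fun d' hd' hb' => hsucc d' hd' hb')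
        · exact Or.inl (hmq _ hrest)
      · exact Or.inr (fun d' hd' hb' => hmex _ (hcl d' hd' hb'))
    rcases hc' with rfl | hcex'
    · exact hold (Or.inl rfl)
    · rcases hmix c' hcex' with h1 | ⟨hinq, _⟩
      · exact hold (Or.inr h1)
      · exact Or.inl hinq

theorem pvMemA (grid : List String) (bombs : PySem.Set (Int × Int)) (c : Int × Int) :
    c ∈ pvLoopA grid bombs [((0 : Int), (0 : Int))] PySem.Set.empty ↔
      pvReach grid bombs c := by
  constructor
  · intro hc
    refine pvLoopA_sound grid bombs _ _ ?_ ?_ c hc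
    · intro c' hc'
      exact Or.inl (List.mem_singleton.mp hc')
    · intro c' hc'
      exact absurd hc' List.not_mem_nil
  · intro hr
    have hclosed := pvLoopA_closed grid bombs [((0 : Int), (0 : Int))] PySem.Set.empty
      (fun c' hc' => by
        rcases hc' with rfl | h
        · exact Or.inl (List.mem_singleton.mpr rfl)
        · exact absurd h List.not_mem_nil)
    induction hr with
    | start d hd hb => exact hclosed ((0 : Int), (0 : Int)) (Or.inl rfl) d hd hb
    | step c hc d hd hb ih => exact hclosed c (Or.inr ih) d hd hb

theorem pvSuccB_mem (grid : List String) (bombs : PySem.Set (Int × Int)) (x y : Int)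
    (n : Int × Int) : n ∈ pvSuccB grid bombs x y ↔
      (∃ d ∈ pvDirs grid x y, n = (x + d.1, y + d.2)) ∧ n ∈ bombs := by
  constructor
  · intro h
    have h1 := (PySem.Set.mem_ofList _ _).mp h
    have h2 := List.mem_filter.mp h1
    obtain ⟨d, hd, hfd⟩ := List.mem_map.mp h2.1
    exact ⟨⟨d, hd, hfd.symm⟩, (PySem.Set.contains_iff _ _).mp h2.2⟩
  · rintro ⟨⟨d, hd, rfl⟩, hb⟩
    exact (PySem.Set.mem_ofList _ _).mpr (List.mem_filter.mpr
      ⟨List.mem_map.mpr ⟨d, hd, rfl⟩, (PySem.Set.contains_iff _ _).mpr hb⟩)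

theorem pvRoundB_mem (grid : List String) (bombs : PySem.Set (Int × Int))
    (ex : PySem.Set (Int × Int)) (n : Int × Int) :
    n ∈ pvRoundB grid bombs ex ↔
      (∃ c ∈ ex, n ∈ pvSuccB grid bombs c.1 c.2) ∧ n ∉ ex := by
  unfold pvRoundB
  rw [PySem.Set.mem_diff, PySem.Set.mem_ofList, List.mem_flatMap]

theorem pvIterB_mono (grid : List String) (bombs : PySem.Set (Int × Int)) :
    ∀ (ex : PySem.Set (Int × Int)) (c : Int × Int), c ∈ ex →
      c ∈ pvIterB grid bombs ex := by
  intro ex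
  induction ex using pvIterB.induct grid bombs with
  | case1 ex h =>
    intro c hc
    rw [pvIterB, if_pos h]
    exact hc
  | case2 ex h ih =>
    intro c hc
    rw [pvIterB, if_neg h]
    exact ih c ((PySem.Set.mem_union _ _ _).mpr (Or.inl hc))

theorem pvIterB_sound (grid : List String) (bombs : PySem.Set (Int × Int)) :
    ∀ (ex : PySem.Set (Int × Int)),
      (∀ c ∈ ex, pvReach grid bombs c) →
      ∀ c ∈ pvIterB grid bombs ex, pvReach grid bombs c := by
  intro ex
  induction ex using pvIterB.induct grid bombs with
  | case1 ex h =>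
    intro hall c hc
    rw [pvIterB, if_pos h] at hc
    exact hall c hc
  | case2 ex h ih =>
    intro hall c hc
    rw [pvIterB, if_neg h] at hc
    refine ih ?_ c hc
    intro c' hc'
    rcases (PySem.Set.mem_union _ _ _).mp hc' with h1 | h2
    · exact hall c' h1
    · obtain ⟨⟨c0, hc0, hsucc⟩, _⟩ := (pvRoundB_mem _ _ _ _).mp h2
      obtain ⟨⟨d, hd, rfl⟩, hb⟩ := (pvSuccB_mem _ _ _ _ _).mp hsucc
      exact pvReach.step c0 (hall c0 hc0) d hd hb

theorem pvIterB_closed (grid : List String) (bombs : PySem.Set (Int × Int)) :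
    ∀ (ex : PySem.Set (Int × Int)) (c : Int × Int), c ∈ pvIterB grid bombs ex →
      ∀ d ∈ pvDirs grid c.1 c.2, (c.1 + d.1, c.2 + d.2) ∈ bombs →
        (c.1 + d.1, c.2 + d.2) ∈ pvIterB grid bombs ex := by
  intro ex
  induction ex using pvIterB.induct grid bombs with
  | case1 ex h =>
    intro c hc d hd hb
    rw [pvIterB, if_pos h] at hc ⊢
    by_contra hne
    have hmem : (c.1 + d.1, c.2 + d.2) ∈ pvRoundB grid bombs ex :=
      (pvRoundB_mem _ _ _ _).mpr
        ⟨⟨c, hc, (pvSuccB_mem _ _ _ _ _).mpr ⟨⟨d, hd, rfl⟩, hb⟩⟩, hne⟩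
    rw [List.isEmpty_iff.mp h] at hmem
    exact absurd hmem List.not_mem_nil
  | case2 ex h ih =>
    intro c hc d hd hb
    rw [pvIterB, if_neg h] at hc ⊢
    exact ih c hc d hd hb

theorem pvMemB (grid : List String) (bombs : PySem.Set (Int × Int)) (c : Int × Int) :
    c ∈ pvIterB grid bombs (pvSuccB grid bombs 0 0) ↔ pvReach grid bombs c := by
  constructor
  · refine fun h => pvIterB_sound grid bombs _ ?_ c h
    intro c' hc'
    obtain ⟨⟨d, hd, rfl⟩, hb⟩ := (pvSuccB_mem _ _ _ _ _).mp hc'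
    exact pvReach.start d hd hb
  · intro hr
    induction hr with
    | start d hd hb =>
      exact pvIterB_mono grid bombs _ _
        ((pvSuccB_mem _ _ _ _ _).mpr ⟨⟨d, hd, rfl⟩, hb⟩)
    | step c hc d hd hb ih => exact pvIterB_closed grid bombs _ c ih d hd hb

theorem pvBombs_mem (grid : List String) (p : Int × Int) :
    p ∈ PySem.Set.ofList ((PySem.Set.ofList ((PySem.List.pyRange 0 grid.length 1).flatMap
        (fun i => (PySem.List.pyRange 0 (pvCols grid) 1).map (fun j => (i, j))))).filter
        (pvIsBomb grid)) ↔ p ∈ pvBombsB grid := by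
  simp only [pvBombsB, PySem.Set.mem_ofList, List.mem_filter, List.mem_flatMap,
    List.mem_map]
  constructor
  · rintro ⟨⟨i, hi, j, hj, rfl⟩, hbomb⟩
    exact ⟨i, hi, j, ⟨hj, hbomb⟩, rfl⟩
  · rintro ⟨i, hi, j, ⟨hj, hbomb⟩, rfl⟩
    exact ⟨⟨i, hi, j, hj, rfl⟩, hbomb⟩

theorem pvFinal (grid : List String) (bA bB exA exB : PySem.Set (Int × Int))
    (hmem : ∀ p, p ∈ bA ↔ p ∈ bB)
    (hA : ∀ c, c ∈ exA ↔ pvReach grid bA c)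
    (hB : ∀ c, c ∈ exB ↔ pvReach grid bB c) :
    PySem.Set.equal exA bA = PySem.Set.equal exB bB := by
  have hR : ∀ c, pvReach grid bA c ↔ pvReach grid bB c := fun c =>
    ⟨pvReach_congr grid bA bB hmem c,
     pvReach_congr grid bB bA (fun p => (hmem p).symm) c⟩
  have hiff : PySem.Set.equal exA bA = true ↔ PySem.Set.equal exB bB = true := by
    rw [PySem.Set.equal_iff, PySem.Set.equal_iff]
    constructor
    · intro h x
      rw [hB, ← hR, ← hA, h, hmem]
    · intro h x
      rw [hA, hR, ← hB, h, ← hmem]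
  cases h1 : PySem.Set.equal exA bA <;> cases h2 : PySem.Set.equal exB bB <;> simp_all

-- ===== VERDICT (by name: the statement is the Claim_ definition above) =====
theorem all_explode_spec : Claim_equal_all_explode := by
  intro grid _ _
  unfold Spec_all_explode
  simp only [all_explode, all_explode_alt]
  exact pvFinal grid _ _ _ _ (pvBombs_mem grid) (fun c => pvMemA grid _ c)
    (fun c => pvMemB grid _ c)
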